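-- pv_equiv track=rewrite | github.com/llvm/llvm-project | lat5150drvmil/02-ai-engine/sub_agents/nps_abuse_potential_analyzer.py | _predict_dea_schedule
-- ===== SOURCE A (Python) =====
-- from typing import Dict, Any, List, Optional, Tuple
--
-- def _predict_dea_schedule(chemical_classes: List[str]) -> str:
--     """Predict DEA schedule"""
--     if any('Fentanyl' in c for c in chemical_classes):
--         return 'Schedule I (predicted) - Extreme abuse potential + lethality'
--     elif any('Synthetic Opioid' in c for c in chemical_classes):
--         return 'Schedule II (predicted) - High abuse potential'
--     elif any('Cannabinoid' in c or 'Cathinone' in c for c in chemical_classes):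
--         return 'Schedule I (predicted) - No medical use, high abuse'
--     elif any('Benzodiazepine' in c for c in chemical_classes):
--         return 'Schedule IV (predicted) - Moderate abuse potential'
--     else:
--         return 'Unscheduled (monitor for emergency scheduling)'
-- ===== SOURCE B (Python) =====
-- from typing import List
--
-- _SCHEDULE_TABLE = [
--     'Schedule I (predicted) - Extreme abuse potential + lethality',
--     'Schedule II (predicted) - High abuse potential',
--     'Schedule I (predicted) - No medical use, high abuse',
--     'Schedule IV (predicted) - Moderate abuse potential',
--     'Unscheduled (monitor for emergency scheduling)',
-- ]
--
-- def _rank(c: str) -> int: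
--     """Severity rank of one chemical class (0 = most severe, 4 = unranked)."""
--     if 'Fentanyl' in c:
--         return 0
--     if 'Synthetic Opioid' in c:
--         return 1
--     if 'Cannabinoid' in c or 'Cathinone' in c:
--         return 2
--     if 'Benzodiazepine' in c:
--         return 3
--     return 4
--
-- def _predict_dea_schedule(chemical_classes: List[str]) -> str:
--     """Predict DEA schedule: minimum severity rank over all classes, then a table lookup."""
--     best = 4
--     for c in chemical_classes:
--         best = min(best, _rank(c))
--     return _SCHEDULE_TABLE[best]
-- ===== Notes on version B (the rewrite author's own statement) =====
-- stated objective: alternative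
-- what changed: Replaced the cascade of four any() scans returning string literals by a numeric severity rank per class, a single min-fold over those ranks, and an indexed lookup into a schedule table.
import Mathlib
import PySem

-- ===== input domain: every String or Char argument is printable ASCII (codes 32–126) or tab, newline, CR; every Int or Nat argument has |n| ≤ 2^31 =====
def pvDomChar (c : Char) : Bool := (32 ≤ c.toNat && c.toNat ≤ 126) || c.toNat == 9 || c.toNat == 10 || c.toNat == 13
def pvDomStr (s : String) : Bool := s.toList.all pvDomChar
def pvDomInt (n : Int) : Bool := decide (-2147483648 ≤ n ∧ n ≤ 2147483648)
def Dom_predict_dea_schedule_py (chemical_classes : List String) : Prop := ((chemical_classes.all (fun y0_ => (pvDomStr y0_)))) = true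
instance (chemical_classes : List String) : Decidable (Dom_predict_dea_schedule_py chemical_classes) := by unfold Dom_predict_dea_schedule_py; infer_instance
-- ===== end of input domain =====

-- B replaces A's cascade of any() scans by a per-class numeric severity rank, a min-fold, and a table lookup; same values, alternative formulation.
-- ===== PORT A =====
def predict_dea_schedule_py (chemical_classes : List String) : String :=
  if chemical_classes.any (fun c => PySem.Str.isIn "Fentanyl" c) then
    "Schedule I (predicted) - Extreme abuse potential + lethality"
  else if chemical_classes.any (fun c => PySem.Str.isIn "Synthetic Opioid" c) then
    "Schedule II (predicted) - High abuse potential"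
  else if chemical_classes.any (fun c => PySem.Str.isIn "Cannabinoid" c || PySem.Str.isIn "Cathinone" c) then
    "Schedule I (predicted) - No medical use, high abuse"
  else if chemical_classes.any (fun c => PySem.Str.isIn "Benzodiazepine" c) then
    "Schedule IV (predicted) - Moderate abuse potential"
  else
    "Unscheduled (monitor for emergency scheduling)"

-- ===== PORT B =====
def pvScheduleTable : List String :=
  ["Schedule I (predicted) - Extreme abuse potential + lethality",
   "Schedule II (predicted) - High abuse potential",
   "Schedule I (predicted) - No medical use, high abuse",
   "Schedule IV (predicted) - Moderate abuse potential",
   "Unscheduled (monitor for emergency scheduling)"]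

def pvRank (c : String) : Nat :=
  if PySem.Str.isIn "Fentanyl" c then 0
  else if PySem.Str.isIn "Synthetic Opioid" c then 1
  else if PySem.Str.isIn "Cannabinoid" c || PySem.Str.isIn "Cathinone" c then 2
  else if PySem.Str.isIn "Benzodiazepine" c then 3
  else 4

def predict_dea_schedule_py_alt (chemical_classes : List String) : String :=
  pvScheduleTable.getD (chemical_classes.foldl (fun best c => min best (pvRank c)) 4) ""

-- ===== PRECONDITION & SPEC =====
def Spec_predict_dea_schedule_py (chemical_classes : List String) (out : String) : Prop := out = predict_dea_schedule_py_alt chemical_classes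
instance (chemical_classes : List String) (out : String) : Decidable (Spec_predict_dea_schedule_py chemical_classes out) := by unfold Spec_predict_dea_schedule_py; infer_instance

-- ===== CLAIM (what is proved, stated in full; the proofs are below) =====
def Claim_equal_predict_dea_schedule_py : Prop := ∀ (chemical_classes : List String), Dom_predict_dea_schedule_py chemical_classes → Spec_predict_dea_schedule_py chemical_classes (predict_dea_schedule_py chemical_classes)

-- ===== LEMMAS AND PROOFS =====
lemma pv_fold_le_seed (xs : List String) (m : Nat) :
    xs.foldl (fun best c => min best (pvRank c)) m ≤ m := by
  induction xs generalizing m with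
  | nil => simp
  | cons a xs ih => exact le_trans (ih _) (min_le_left _ _)

lemma pv_fold_le {xs : List String} {c : String} (h : c ∈ xs) (m : Nat) :
    xs.foldl (fun best c => min best (pvRank c)) m ≤ pvRank c := by
  induction xs generalizing m with
  | nil => cases h
  | cons a xs ih =>
    rw [List.foldl_cons]
    rcases List.mem_cons.mp h with rfl | h
    · exact le_trans (pv_fold_le_seed xs _) (min_le_right m (pvRank c))
    · exact ih h _

lemma pv_le_fold {xs : List String} {k : Nat} (h : ∀ c ∈ xs, k ≤ pvRank c)
    {m : Nat} (hm : k ≤ m) :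
    k ≤ xs.foldl (fun best c => min best (pvRank c)) m := by
  induction xs generalizing m with
  | nil => simpa
  | cons a xs ih =>
    refine ih (fun c hc => h c (List.mem_cons_of_mem _ hc)) ?_
    have := h a (List.mem_cons_self)
    exact le_min hm this

theorem predict_dea_schedule_py_spec : Claim_equal_predict_dea_schedule_py := by
  intro xs _
  unfold Spec_predict_dea_schedule_py predict_dea_schedule_py predict_dea_schedule_py_alt
  by_cases hF : (xs.any fun c => PySem.Str.isIn "Fentanyl" c) = true
  · obtain ⟨c, hc, hcF⟩ := List.any_eq_true.mp hF
    have hr : pvRank c = 0 := by unfold pvRank; rw [if_pos hcF]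
    have hfold : xs.foldl (fun best c => min best (pvRank c)) 4 = 0 := by
      have := pv_fold_le hc 4; omega
    rw [if_pos hF, hfold]; rfl
  · have hF' := List.any_eq_false.mp (Bool.not_eq_true _ ▸ hF)
    simp only [Bool.not_eq_true] at hF'
    by_cases hS : (xs.any fun c => PySem.Str.isIn "Synthetic Opioid" c) = true
    · obtain ⟨c, hc, hcS⟩ := List.any_eq_true.mp hS
      have hr : pvRank c = 1 := by
        unfold pvRank; rw [hF' c hc, hcS]; rfl
      have hlo : ∀ d ∈ xs, 1 ≤ pvRank d := by
        intro d hd; unfold pvRank; rw [hF' d hd]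
        split_ifs <;> simp_all
      have hfold : xs.foldl (fun best c => min best (pvRank c)) 4 = 1 := by
        have h1 := pv_fold_le hc 4
        have h2 := pv_le_fold hlo (by norm_num : (1:Nat) ≤ 4)
        omega
      rw [if_neg hF, if_pos hS, hfold]; rfl
    · have hS' := List.any_eq_false.mp (Bool.not_eq_true _ ▸ hS)
      simp only [Bool.not_eq_true] at hS'
      by_cases hC : (xs.any fun c => PySem.Str.isIn "Cannabinoid" c || PySem.Str.isIn "Cathinone" c) = true
      · obtain ⟨c, hc, hcC⟩ := List.any_eq_true.mp hC
        have hr : pvRank c = 2 := by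
          unfold pvRank; rw [hF' c hc, hS' c hc, hcC]; rfl
        have hlo : ∀ d ∈ xs, 2 ≤ pvRank d := by
          intro d hd; unfold pvRank; rw [hF' d hd, hS' d hd]
          split_ifs <;> simp_all
        have hfold : xs.foldl (fun best c => min best (pvRank c)) 4 = 2 := by
          have h1 := pv_fold_le hc 4
          have h2 := pv_le_fold hlo (by norm_num : (2:Nat) ≤ 4)
          omega
        rw [if_neg hF, if_neg hS, if_pos hC, hfold]; rfl
      · have hC' := List.any_eq_false.mp (Bool.not_eq_true _ ▸ hC)
        simp only [Bool.not_eq_true] at hC'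
        by_cases hB : (xs.any fun c => PySem.Str.isIn "Benzodiazepine" c) = true
        · obtain ⟨c, hc, hcB⟩ := List.any_eq_true.mp hB
          have hr : pvRank c = 3 := by
            unfold pvRank; rw [hF' c hc, hS' c hc, hC' c hc, hcB]; rfl
          have hlo : ∀ d ∈ xs, 3 ≤ pvRank d := by
            intro d hd; unfold pvRank; rw [hF' d hd, hS' d hd, hC' d hd]
            split_ifs <;> simp_all
          have hfold : xs.foldl (fun best c => min best (pvRank c)) 4 = 3 := by
            have h1 := pv_fold_le hc 4
            have h2 := pv_le_fold hlo (by norm_num : (3:Nat) ≤ 4)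
            omega
          rw [if_neg hF, if_neg hS, if_neg hC, if_pos hB, hfold]; rfl
        · have hB' := List.any_eq_false.mp (Bool.not_eq_true _ ▸ hB)
          simp only [Bool.not_eq_true] at hB'
          have hlo : ∀ d ∈ xs, 4 ≤ pvRank d := by
            intro d hd; unfold pvRank; rw [hF' d hd, hS' d hd, hC' d hd, hB' d hd]; decide
          have hfold : xs.foldl (fun best c => min best (pvRank c)) 4 = 4 := by
            have h1 := pv_fold_le_seed xs 4
            have h2 := pv_le_fold hlo (le_refl 4)
            omega
          rw [if_neg hF, if_neg hS, if_neg hC, if_neg hB, hfold]; rfl
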